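-- pv_equiv track=rewrite | github.com/matiasrmb/estacionamiento-central | controllers/tarifas_controller.py | construir_intervalos_equitativos
-- ===== SOURCE A (Python) =====
-- def construir_intervalos_equitativos(cantidad_tramos, minutos_totales=60):
--     """
--     Divide un total de minutos en una cantidad de tramos de forma lo más
--     equitativa posible.
--
--     Args:
--         cantidad_tramos (int): Número de tramos a generar.
--         minutos_totales (int): Minutos totales a repartir.
--
--     Returns:
--         list[tuple[int, int]]: Lista de intervalos (inicio, fin).
--     """
--     if cantidad_tramos <= 0:
--         raise ValueError("La cantidad de tramos debe ser mayor que cero.")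
--
--     if cantidad_tramos > minutos_totales:
--         raise ValueError(
--             "No es posible generar más tramos que minutos disponibles dentro de una hora."
--         )
--
--     base = minutos_totales // cantidad_tramos
--     sobrantes = minutos_totales % cantidad_tramos
--
--     intervalos = []
--     minuto_actual = 0
--
--     for i in range(cantidad_tramos):
--         longitud = base + (1 if i < sobrantes else 0)
--         inicio = minuto_actual
--         fin = minuto_actual + longitud - 1
--         intervalos.append((inicio, fin))
--         minuto_actual += longitud
--
--     return intervalos
-- ===== SOURCE B (Python) =====
-- def construir_intervalos_equitativos(cantidad_tramos, minutos_totales=60):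
--     """Divide minutos en tramos equitativos via una funcion de frontera cerrada."""
--     if cantidad_tramos <= 0:
--         raise ValueError("La cantidad de tramos debe ser mayor que cero.")
--     if cantidad_tramos > minutos_totales:
--         raise ValueError(
--             "No es posible generar más tramos que minutos disponibles dentro de una hora."
--         )
--     base = minutos_totales // cantidad_tramos
--     sobrantes = minutos_totales % cantidad_tramos
--
--     def boundary(i):
--         return i * base + min(i, sobrantes)
--
--     return [(boundary(i), boundary(i + 1) - 1) for i in range(cantidad_tramos)]
-- ===== Notes on version B (the rewrite author's own statement) =====
-- stated objective: alternative
-- what changed: Replaces the running-cursor loop that accumulates minuto_actual with a stateless closed-form boundary function boundary(i)=i*base+min(i,sobrantes), deriving each (inicio,fin) directly from its index.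
import Mathlib
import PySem

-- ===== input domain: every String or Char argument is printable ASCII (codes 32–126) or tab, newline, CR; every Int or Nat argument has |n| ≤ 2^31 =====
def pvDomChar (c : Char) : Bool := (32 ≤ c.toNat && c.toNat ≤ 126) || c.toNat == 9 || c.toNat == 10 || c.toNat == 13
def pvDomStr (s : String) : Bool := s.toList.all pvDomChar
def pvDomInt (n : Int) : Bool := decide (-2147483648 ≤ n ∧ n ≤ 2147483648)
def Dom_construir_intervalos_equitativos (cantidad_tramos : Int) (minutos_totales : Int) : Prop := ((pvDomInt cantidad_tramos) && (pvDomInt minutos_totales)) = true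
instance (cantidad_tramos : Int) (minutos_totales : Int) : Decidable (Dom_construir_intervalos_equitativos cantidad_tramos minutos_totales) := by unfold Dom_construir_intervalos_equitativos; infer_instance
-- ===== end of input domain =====

-- B replaces A's running-cursor loop with a stateless closed-form boundary function (alternative decomposition, same cost).


-- ===== PORT A =====
def construir_intervalos_equitativos (cantidad_tramos : Int) (minutos_totales : Int) : List (Int × Int) :=
  let base := PySem.Int.floordiv minutos_totales cantidad_tramos
  let sobrantes := PySem.Int.mod minutos_totales cantidad_tramos
  let r := (PySem.List.pyRange 0 cantidad_tramos 1).foldl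
    (fun (st : List (Int × Int) × Int) i =>
      let longitud := base + (if i < sobrantes then 1 else 0)
      let inicio := st.2
      let fin := st.2 + longitud - 1
      (st.1 ++ [(inicio, fin)], st.2 + longitud))
    ([], 0)
  r.1

-- ===== PORT B =====
def pvBoundary (base sobrantes i : Int) : Int := i * base + min i sobrantes

def construir_intervalos_equitativos_alt (cantidad_tramos : Int) (minutos_totales : Int) : List (Int × Int) :=
  let base := PySem.Int.floordiv minutos_totales cantidad_tramos
  let sobrantes := PySem.Int.mod minutos_totales cantidad_tramos
  (PySem.List.pyRange 0 cantidad_tramos 1).map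
    (fun i => (pvBoundary base sobrantes i, pvBoundary base sobrantes (i + 1) - 1))

-- ===== PRECONDITION & SPEC =====
-- Pre_ excludes exactly the inputs on which A raises ValueError: cantidad_tramos ≤ 0 or cantidad_tramos > minutos_totales.
def Pre_construir_intervalos_equitativos (cantidad_tramos : Int) (minutos_totales : Int) : Prop :=
  0 < cantidad_tramos ∧ cantidad_tramos ≤ minutos_totales
instance (cantidad_tramos : Int) (minutos_totales : Int) : Decidable (Pre_construir_intervalos_equitativos cantidad_tramos minutos_totales) := by unfold Pre_construir_intervalos_equitativos; infer_instance

def pvWitness_construir_intervalos_equitativos : Int × Int := (4, 10)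

def Spec_construir_intervalos_equitativos (cantidad_tramos : Int) (minutos_totales : Int) (out : List (Int × Int)) : Prop := out = construir_intervalos_equitativos_alt cantidad_tramos minutos_totales
instance (cantidad_tramos : Int) (minutos_totales : Int) (out : List (Int × Int)) : Decidable (Spec_construir_intervalos_equitativos cantidad_tramos minutos_totales out) := by unfold Spec_construir_intervalos_equitativos; infer_instance

-- ===== CLAIM (what is proved, stated in full; the proofs are below) =====
def Claim_equal_construir_intervalos_equitativos : Prop := ∀ (cantidad_tramos : Int) (minutos_totales : Int), Dom_construir_intervalos_equitativos cantidad_tramos minutos_totales → Pre_construir_intervalos_equitativos cantidad_tramos minutos_totales → Spec_construir_intervalos_equitativos cantidad_tramos minutos_totales (construir_intervalos_equitativos cantidad_tramos minutos_totales)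

-- ===== LEMMAS AND PROOFS =====

-- Loop invariant: after k iterations, A's accumulator equals B's first k intervals
-- and the cursor equals the closed-form boundary at k.
lemma pv_loop (base sobrantes : Int) (hs : 0 ≤ sobrantes) (k : Nat) :
    (PySem.List.pyRange 0 (k : Int) 1).foldl
      (fun (st : List (Int × Int) × Int) i =>
        let longitud := base + (if i < sobrantes then 1 else 0)
        let inicio := st.2
        let fin := st.2 + longitud - 1
        (st.1 ++ [(inicio, fin)], st.2 + longitud))
      ([], 0)
    = ((PySem.List.pyRange 0 (k : Int) 1).map
        (fun i => (pvBoundary base sobrantes i, pvBoundary base sobrantes (i + 1) - 1)),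
       pvBoundary base sobrantes (k : Int)) := by
  induction k with
  | zero => simp [PySem.List.pyRange_one_eq_nil, pvBoundary]; omega
  | succ k ih =>
    have h : ((k : Int) + 1) = ((k + 1 : Nat) : Int) := by push_cast; ring
    rw [← h, PySem.List.pyRange_one_succ_right (by positivity)]
    simp only [List.foldl_append, List.map_append, ih, List.foldl_cons, List.foldl_nil,
      List.map_cons, List.map_nil]
    have hmin : min (k : Int) sobrantes + (if (k : Int) < sobrantes then 1 else 0)
        = min ((k : Int) + 1) sobrantes := by split_ifs <;> omega
    rw [Prod.mk.injEq]
    refine ⟨?_, ?_⟩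
    · congr 2
      simp only [pvBoundary]
      rw [← hmin]; ring
    · simp only [pvBoundary]
      rw [← hmin]; ring

-- ===== VERDICT (by name: the statement is the Claim_ definition above) =====
theorem construir_intervalos_equitativos_spec : Claim_equal_construir_intervalos_equitativos := by
  intro n m _ hpre
  obtain ⟨h1, h2⟩ := hpre
  unfold Spec_construir_intervalos_equitativos construir_intervalos_equitativos
    construir_intervalos_equitativos_alt
  have hs : 0 ≤ PySem.Int.mod m n := by
    have := PySem.Int.mod_eq_emod_of_pos (a := m) h1
    rw [this]
    exact Int.emod_nonneg m (by omega)
  have hn : n = ((n.toNat : Nat) : Int) := by omega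
  rw [hn] at hs ⊢
  exact congrArg Prod.fst
    (pv_loop (PySem.Int.floordiv m ((n.toNat : Nat) : Int))
      (PySem.Int.mod m ((n.toNat : Nat) : Int)) hs n.toNat)
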